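-- pv_equiv track=rewrite | github.com/PabloeCancino/TME_Nudos | Codigo/conway_to_pq.py | conway_to_pq
-- ===== SOURCE A (Python) =====
-- def conway_to_pq(conway_notation: str) -> tuple:
--     """
--     Convert Conway notation to p/q fraction.
--
--     Args:
--         conway_notation: String like "52" or "3 1 3" representing coefficients
--
--     Returns:
--         (p, q) tuple
--
--     Example:
--         "52" -> [5, 2] -> 5 + 1/2 = 11/2
--         "313" -> [3, 1, 3] -> 3 + 1/(1 + 1/3) = 3 + 1/(4/3) = 3 + 3/4 = 15/4
--     """
--     # Parse notation - could be "52" or "5 2" or "5,2"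
--     if ' ' in conway_notation:
--         coeffs = [int(x) for x in conway_notation.split()]
--     elif ',' in conway_notation:
--         coeffs = [int(x) for x in conway_notation.split(',')]
--     else:
--         # Each digit is a coefficient
--         coeffs = [int(c) for c in conway_notation]
--
--     # Evaluate continued fraction from right to left
--     # [a, b, c] = a + 1/(b + 1/c)
--     if not coeffs:
--         return (0, 1)
--
--     # Start from the rightmost term
--     p, q = coeffs[-1], 1
--
--     # Work backwards
--     for i in range(len(coeffs) - 2, -1, -1):
--         # Current fraction is p/q
--         # Next level: coeffs[i] + 1/(p/q) = coeffs[i] + q/p = (coeffs[i]*p + q)/p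
--         p, q = coeffs[i] * p + q, p
--
--     return (p, q)
-- ===== SOURCE B (Python) =====
-- def conway_to_pq(conway_notation: str) -> tuple:
--     # Same parsing and empty-input guard as the original.
--     if ' ' in conway_notation:
--         coeffs = [int(x) for x in conway_notation.split()]
--     elif ',' in conway_notation:
--         coeffs = [int(x) for x in conway_notation.split(',')]
--     else:
--         coeffs = [int(c) for c in conway_notation]
--
--     if not coeffs:
--         return (0, 1)
--
--     # Forward convergent recurrence (left-to-right) instead of the
--     # backward right-to-left fold.
--     h_prev2, h_prev1 = 0, 1
--     k_prev2, k_prev1 = 1, 0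
--     for a in coeffs:
--         h = a * h_prev1 + h_prev2
--         k = a * k_prev1 + k_prev2
--         h_prev2, h_prev1 = h_prev1, h
--         k_prev2, k_prev1 = k_prev1, k
--     return (h_prev1, k_prev1)
-- ===== Notes on version B (the rewrite author's own statement) =====
-- stated objective: alternative
-- what changed: The right-to-left backward fold over the coefficients (maintaining one running fraction p/q) is replaced by the standard forward convergent recurrence h=a*h1+h2, k=a*k1+k2 traversing the coefficients left-to-right while maintaining the two previous convergents; parsing and the empty guard are unchanged.
import Mathlib
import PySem

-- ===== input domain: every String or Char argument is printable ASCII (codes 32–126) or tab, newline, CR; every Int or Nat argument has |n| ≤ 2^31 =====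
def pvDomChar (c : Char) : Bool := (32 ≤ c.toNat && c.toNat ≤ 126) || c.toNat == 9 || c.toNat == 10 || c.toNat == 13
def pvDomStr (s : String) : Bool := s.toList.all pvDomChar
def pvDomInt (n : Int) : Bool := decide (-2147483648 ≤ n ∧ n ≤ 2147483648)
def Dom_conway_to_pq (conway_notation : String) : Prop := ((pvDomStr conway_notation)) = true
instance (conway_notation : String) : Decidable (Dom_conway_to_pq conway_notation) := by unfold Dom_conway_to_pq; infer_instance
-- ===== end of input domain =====

-- B replaces A's backward right-to-left fold by the forward convergent recurrence
-- (same parsing and empty guard); alternative decomposition, same cost.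


-- ===== PORT A =====
-- the parsing step shared verbatim by A and B (B reuses A's parsing code unchanged):
-- list of int tokens; Pre_ guarantees every int() succeeds, so getD 0 is never the raising case
def pvParse (conway_notation : String) : List Int :=
  if PySem.Str.isIn " " conway_notation then
    (PySem.Chars.split₀ conway_notation.toList).map (fun t => (PySem.Int.ofChars? t).getD 0)
  else if PySem.Str.isIn "," conway_notation then
    (PySem.Chars.splitOn conway_notation.toList [',']).map (fun t => (PySem.Int.ofChars? t).getD 0)
  else
    conway_notation.toList.map (fun c => (PySem.Int.ofChars? [c]).getD 0)

def conway_to_pq (conway_notation : String) : Int × Int :=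
  let coeffs := pvParse conway_notation
  if coeffs = [] then (0, 1)
  else
    (PySem.List.pyRange ((coeffs.length : Int) - 2) (-1) (-1)).foldl
      (fun pq i => (PySem.List.pyGetD coeffs i 0 * pq.1 + pq.2, pq.1))
      (PySem.List.pyGetD coeffs (-1) 0, 1)

-- ===== PORT B =====
def conway_to_pq_alt (conway_notation : String) : Int × Int :=
  let coeffs := pvParse conway_notation
  if coeffs = [] then (0, 1)
  else
    let st := coeffs.foldl
      (fun (st : Int × Int × Int × Int) a =>
        (st.2.1, a * st.2.1 + st.1, st.2.2.2, a * st.2.2.2 + st.2.2.1))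
      (0, 1, 1, 0)
    (st.2.1, st.2.2.2)

-- ===== PRECONDITION & SPEC =====
-- Pre_ excludes exactly the inputs where some parsed token is not a valid int literal,
-- on which Python's int() raises ValueError (in A and in B alike).
def Pre_conway_to_pq (conway_notation : String) : Prop :=
  (if PySem.Str.isIn " " conway_notation then
    (PySem.Chars.split₀ conway_notation.toList).all (fun t => (PySem.Int.ofChars? t).isSome)
  else if PySem.Str.isIn "," conway_notation then
    (PySem.Chars.splitOn conway_notation.toList [',']).all (fun t => (PySem.Int.ofChars? t).isSome)
  else
    conway_notation.toList.all (fun c => (PySem.Int.ofChars? [c]).isSome)) = true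
instance (conway_notation : String) : Decidable (Pre_conway_to_pq conway_notation) := by
  unfold Pre_conway_to_pq; infer_instance

def pvWitness_conway_to_pq : String := "3 1 3"

def Spec_conway_to_pq (conway_notation : String) (out : Int × Int) : Prop := out = conway_to_pq_alt conway_notation
instance (conway_notation : String) (out : Int × Int) : Decidable (Spec_conway_to_pq conway_notation out) := by unfold Spec_conway_to_pq; infer_instance

-- ===== CLAIM (what is proved, stated in full; the proofs are below) =====
def Claim_equal_conway_to_pq : Prop := ∀ (conway_notation : String), Dom_conway_to_pq conway_notation → Pre_conway_to_pq conway_notation → Spec_conway_to_pq conway_notation (conway_to_pq conway_notation)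

-- ===== LEMMAS AND PROOFS =====

-- the backward continued-fraction fold, abstractly (foldr form), and its companion second column
def pvBack (l : List Int) : Int × Int :=
  l.foldr (fun a pq => (a * pq.1 + pq.2, pq.1)) (1, 0)

def pvBack2 (l : List Int) : Int × Int :=
  l.foldr (fun a pq => (a * pq.1 + pq.2, pq.1)) (0, 1)

-- B's forward recurrence, with an arbitrary start state, in terms of the backward folds
theorem pvFwd_eq (l : List Int) (h2 h1 k2 k1 : Int) :
    (l.foldl (fun (st : Int × Int × Int × Int) a =>
        (st.2.1, a * st.2.1 + st.1, st.2.2.2, a * st.2.2.2 + st.2.2.1)) (h2, h1, k2, k1)) =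
      (h1 * (pvBack2 l).1 + h2 * (pvBack2 l).2,
       h1 * (pvBack l).1 + h2 * (pvBack l).2,
       k1 * (pvBack2 l).1 + k2 * (pvBack2 l).2,
       k1 * (pvBack l).1 + k2 * (pvBack l).2) := by
  induction l generalizing h2 h1 k2 k1 with
  | nil => simp [pvBack, pvBack2]
  | cons a l ih =>
      simp only [List.foldl_cons, ih, pvBack, pvBack2, List.foldr_cons]
      refine Prod.ext ?_ (Prod.ext ?_ (Prod.ext ?_ ?_)) <;> simp <;> ring

-- A's index loop computes pvBack on a nonempty list
theorem pvAloop_eq_back (coeffs : List Int) (h : coeffs ≠ []) :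
    (PySem.List.pyRange ((coeffs.length : Int) - 2) (-1) (-1)).foldl
      (fun pq i => (PySem.List.pyGetD coeffs i 0 * pq.1 + pq.2, pq.1))
      (PySem.List.pyGetD coeffs (-1) 0, 1) = pvBack coeffs := by
  have hrev : PySem.List.pyRange ((coeffs.length : Int) - 2) (-1) (-1)
      = (PySem.List.pyRange 0 ((coeffs.length : Int) - 1) 1).reverse := by
    rw [PySem.List.pyRange_neg_one_eq_reverse]
    have : (coeffs.length : Int) - 2 + 1 = (coeffs.length : Int) - 1 := by ring
    rw [show (-1 : Int) + 1 = 0 from rfl, this]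
  rw [hrev, List.foldl_reverse, PySem.List.pyGetD_neg_one coeffs 0 h]
  have hmap : (PySem.List.pyRange 0 ((coeffs.length : Int) - 1) 1).map
      (fun i => PySem.List.pyGetD coeffs i 0) = coeffs.dropLast := by
    have hlen : ((coeffs.dropLast.length : Int)) = (coeffs.length : Int) - 1 := by
      have hdl : coeffs.dropLast.length = coeffs.length - 1 := List.length_dropLast
      have hpos : 0 < coeffs.length := List.length_pos_iff.mpr h
      omega
    rw [← hlen]
    rw [show (fun i => PySem.List.pyGetD coeffs i 0)
        = (fun i => PySem.List.pyGetD coeffs i 0) from rfl]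
    calc (PySem.List.pyRange 0 (coeffs.dropLast.length : Int) 1).map
          (fun i => PySem.List.pyGetD coeffs i 0)
        = (PySem.List.pyRange 0 (coeffs.dropLast.length : Int) 1).map
          (fun i => PySem.List.pyGetD coeffs.dropLast i 0) := by
          apply List.map_congr_left
          intro i hi
          rw [PySem.List.mem_pyRange_one] at hi
          have hdl : coeffs.dropLast.length = coeffs.length - 1 := List.length_dropLast
          rw [PySem.List.pyGetD_eq_getElem (xs := coeffs) (i := i) (d := 0) hi.1 (by omega),
              PySem.List.pyGetD_eq_getElem (xs := coeffs.dropLast) (i := i) (d := 0) hi.1 hi.2]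
          rw [List.getElem_dropLast]
      _ = coeffs.dropLast := by
          have := PySem.List.map_pyGetD_pyRange_zero' coeffs.dropLast (0 : Int)
          simpa using this
  have hfoldr : ∀ (init : Int × Int),
      (PySem.List.pyRange 0 ((coeffs.length : Int) - 1) 1).foldr
        (fun i pq => (PySem.List.pyGetD coeffs i 0 * pq.1 + pq.2, pq.1)) init
      = coeffs.dropLast.foldr (fun a pq => (a * pq.1 + pq.2, pq.1)) init := by
    intro init
    rw [← hmap, List.foldr_map]
  rw [hfoldr]
  conv_rhs => rw [pvBack, ← List.dropLast_append_getLast h, List.foldr_append]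
  norm_num

-- ===== VERDICT (by name: the statement is the Claim_ definition above) =====
theorem conway_to_pq_spec : Claim_equal_conway_to_pq := by
  intro s _ _
  unfold Spec_conway_to_pq conway_to_pq conway_to_pq_alt
  by_cases hc : pvParse s = []
  · simp [hc]
  · simp only [hc]
    rw [pvAloop_eq_back _ hc, pvFwd_eq]
    simp
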